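-- pv_equiv track=rewrite | github.com/Stroesku/py_learn | tasks/in_cross.py | is_cross
-- ===== SOURCE A (Python) =====
-- def is_cross(a, b):
--     ax1, ay1, ax2, ay2 = a[0], a[1], a[2], a[3]
--     bx1, by1, bx2, by2 = b[0], b[1], b[2], b[3]
--
--     aXRange = []
--     aYRange = []
--     bXRange = []
--     bYRange = []
--
--     for x in range(ax1, ax2 + 1):
--         aXRange.append(x)
--
--     for y in range(ay2, ay1 + 1):
--         aYRange.append(y)
--
--     for x in range(bx1, bx2 + 1):
--         bXRange.append(x)
--
--     for y in range(by2, by1 + 1):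
--         bYRange.append(y)
--
--     commonPointOnX = list(set(aXRange) & set(bXRange))
--     commonPointOnY = list(set(aYRange) & set(bYRange))
--
--     return commonPointOnX != [] and commonPointOnY != []
-- ===== SOURCE B (Python) =====
-- def is_cross(a, b):
--     x_ok = max(a[0], b[0]) <= min(a[2], b[2])
--     y_ok = max(a[3], b[3]) <= min(a[1], b[1])
--     return x_ok and y_ok
-- ===== Notes on version B (the rewrite author's own statement) =====
-- stated objective: faster
-- what changed: Replaced materialising every integer coordinate of each rectangle into lists and intersecting them as sets with a direct O(1) interval-overlap test (max of starts <= min of ends on each axis).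
import Mathlib
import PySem

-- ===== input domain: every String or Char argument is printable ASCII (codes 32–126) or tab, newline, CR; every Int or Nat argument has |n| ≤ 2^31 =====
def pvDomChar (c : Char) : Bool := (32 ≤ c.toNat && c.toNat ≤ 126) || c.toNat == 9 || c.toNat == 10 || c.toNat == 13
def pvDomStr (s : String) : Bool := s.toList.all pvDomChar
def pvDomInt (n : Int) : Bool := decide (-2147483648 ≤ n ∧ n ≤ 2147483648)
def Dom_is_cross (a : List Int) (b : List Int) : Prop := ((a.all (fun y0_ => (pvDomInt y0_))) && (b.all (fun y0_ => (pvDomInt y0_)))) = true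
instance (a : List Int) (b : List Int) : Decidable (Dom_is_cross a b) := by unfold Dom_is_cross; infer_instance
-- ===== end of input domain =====

-- B replaces A's materialised coordinate ranges and set intersections by a direct
-- interval-overlap test (max of starts ≤ min of ends on each axis); objective: faster.

-- ===== PORT A =====
-- A-side helpers: hand ports of Python's set(list) and set & set, exact in membership
-- (Python's set is a hash set; ported with Std.HashSet so evaluation cost matches Python's;
-- element order of the `&` result differs from CPython's hash order, which A only tests
-- against [] so the Bool result is exact).
def pySetOfList (xs : List Int) : List Int :=
  (xs.foldl
    (fun (acc : Array Int × Std.HashSet Int) x =>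
      if acc.2.contains x then acc else (acc.1.push x, acc.2.insert x))
    (#[], ∅)).1.toList

def pySetInter (xs ys : List Int) : List Int :=
  let yset : Std.HashSet Int := Std.HashSet.ofList ys
  xs.filter (fun x => yset.contains x)

-- literal port of A: build the four coordinate ranges by appending (list.append ported as
-- Array.push, O(1) like Python's), intersect as sets, test non-emptiness.
-- a[i]/b[i] ported as pyGetD (total form), exact under Pre_is_cross.
def is_cross (a : List Int) (b : List Int) : Bool :=
  let ax1 := PySem.List.pyGetD a 0 0
  let ay1 := PySem.List.pyGetD a 1 0
  let ax2 := PySem.List.pyGetD a 2 0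
  let ay2 := PySem.List.pyGetD a 3 0
  let bx1 := PySem.List.pyGetD b 0 0
  let by1 := PySem.List.pyGetD b 1 0
  let bx2 := PySem.List.pyGetD b 2 0
  let by2 := PySem.List.pyGetD b 3 0
  let aXRange := ((PySem.List.pyRange ax1 (ax2 + 1) 1).foldl (fun acc x => acc.push x) #[]).toList
  let aYRange := ((PySem.List.pyRange ay2 (ay1 + 1) 1).foldl (fun acc y => acc.push y) #[]).toList
  let bXRange := ((PySem.List.pyRange bx1 (bx2 + 1) 1).foldl (fun acc x => acc.push x) #[]).toList
  let bYRange := ((PySem.List.pyRange by2 (by1 + 1) 1).foldl (fun acc y => acc.push y) #[]).toList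
  let commonPointOnX := pySetInter (pySetOfList aXRange) (pySetOfList bXRange)
  let commonPointOnY := pySetInter (pySetOfList aYRange) (pySetOfList bYRange)
  decide (commonPointOnX ≠ []) && decide (commonPointOnY ≠ [])

-- ===== PORT B =====
def is_cross_alt (a : List Int) (b : List Int) : Bool :=
  let xOk := decide (max (PySem.List.pyGetD a 0 0) (PySem.List.pyGetD b 0 0)
                   ≤ min (PySem.List.pyGetD a 2 0) (PySem.List.pyGetD b 2 0))
  let yOk := decide (max (PySem.List.pyGetD a 3 0) (PySem.List.pyGetD b 3 0)
                   ≤ min (PySem.List.pyGetD a 1 0) (PySem.List.pyGetD b 1 0))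
  xOk && yOk

-- ===== PRECONDITION & SPEC =====
-- Pre_ excludes only the inputs on which Python A raises IndexError (a or b shorter than 4).
def Pre_is_cross (a : List Int) (b : List Int) : Prop :=
  4 ≤ a.length ∧ 4 ≤ b.length
instance (a : List Int) (b : List Int) : Decidable (Pre_is_cross a b) := by unfold Pre_is_cross; infer_instance
def pvWitness_is_cross : List Int × List Int := ([0, 2, 3, 0], [1, 4, 5, 1])

def Spec_is_cross (a : List Int) (b : List Int) (out : Bool) : Prop := out = is_cross_alt a b
instance (a : List Int) (b : List Int) (out : Bool) : Decidable (Spec_is_cross a b out) := by unfold Spec_is_cross; infer_instance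

-- ===== CLAIM (what is proved, stated in full; the proofs are below) =====
def Claim_equal_is_cross : Prop := ∀ (a : List Int) (b : List Int), Dom_is_cross a b → Pre_is_cross a b → Spec_is_cross a b (is_cross a b)

-- ===== LEMMAS AND PROOFS =====

lemma foldl_push_toList (xs : List Int) (acc : Array Int) :
    (xs.foldl (fun a x => a.push x) acc).toList = acc.toList ++ xs := by
  induction xs generalizing acc with
  | nil => simp
  | cons x l ih => simp [List.foldl_cons]

lemma mem_pySetOfList_aux (xs : List Int) (x : Int) :
    ∀ acc : Array Int × Std.HashSet Int, (∀ y : Int, y ∈ acc.1.toList ↔ y ∈ acc.2) →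
    (x ∈ (xs.foldl
      (fun (acc : Array Int × Std.HashSet Int) x =>
        if acc.2.contains x then acc else (acc.1.push x, acc.2.insert x)) acc).1.toList
      ↔ x ∈ acc.1.toList ∨ x ∈ xs) := by
  induction xs with
  | nil => intro acc _; simp
  | cons z l ih =>
    intro acc hinv
    simp only [List.foldl_cons]
    by_cases hz : acc.2.contains z
    · rw [if_pos hz]
      rw [ih acc hinv]
      have hzmem : z ∈ acc.1.toList := (hinv z).2 (by simpa using hz)
      constructor
      · rintro (h | h)
        · exact Or.inl h
        · exact Or.inr (List.mem_cons_of_mem _ h)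
      · rintro (h | h)
        · exact Or.inl h
        · rcases List.mem_cons.mp h with rfl | h
          · exact Or.inl hzmem
          · exact Or.inr h
    · rw [if_neg hz]
      rw [ih (acc.1.push z, acc.2.insert z)
        (by
          intro y
          simp only [Array.toList_push, List.mem_append, List.mem_singleton,
            Std.HashSet.mem_insert, hinv y, beq_iff_eq]
          constructor
          · rintro (h | rfl)
            · exact Or.inr h
            · exact Or.inl rfl
          · rintro (rfl | h)
            · exact Or.inr rfl
            · exact Or.inl h)]
      simp only [Array.toList_push, List.mem_append, List.mem_cons]
      tauto

lemma mem_pySetOfList (xs : List Int) (x : Int) : x ∈ pySetOfList xs ↔ x ∈ xs := by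
  unfold pySetOfList
  rw [mem_pySetOfList_aux xs x (#[], ∅) (by simp)]
  simp

lemma pySetInter_ne_nil (xs ys : List Int) :
    pySetInter xs ys ≠ [] ↔ ∃ x, x ∈ xs ∧ x ∈ ys := by
  unfold pySetInter
  rw [← List.isEmpty_eq_false_iff, List.isEmpty_eq_false_iff_exists_mem]
  simp [List.mem_filter]

-- the intersection of set(range(p, q+1)) and set(range(r, s+1)) is non-empty
-- exactly when max p r ≤ min q s
lemma inter_range_ne_nil (p q r s : Int) :
    (pySetInter (pySetOfList (PySem.List.pyRange p (q + 1) 1))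
       (pySetOfList (PySem.List.pyRange r (s + 1) 1)) ≠ []) ↔ max p r ≤ min q s := by
  rw [pySetInter_ne_nil]
  constructor
  · rintro ⟨x, hx1, hx2⟩
    rw [mem_pySetOfList, PySem.List.mem_pyRange_one] at hx1 hx2
    omega
  · intro h
    refine ⟨max p r, ?_, ?_⟩ <;>
      · rw [mem_pySetOfList, PySem.List.mem_pyRange_one]; omega

-- ===== VERDICT (by name: the statement is the Claim_ definition above) =====
theorem is_cross_spec : Claim_equal_is_cross := by
  intro a b _ _
  unfold Spec_is_cross is_cross is_cross_alt
  simp only [foldl_push_toList, List.nil_append]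
  rw [Bool.eq_iff_iff]
  simp only [Bool.and_eq_true, decide_eq_true_eq, inter_range_ne_nil]
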